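-- pv_equiv track=rewrite | github.com/amirhoseinbaghery/turkparker | extension/utils.py | persian_num
-- ===== SOURCE A (Python) =====
-- def persian_num(mystr):
--     numbers = {
--         "0": "۰",
--         "1": "۱",
--         "2": "۲",
--         "3": "۳",
--         "4": "۴",
--         "5": "۵",
--         "6": "۶",
--         "7": "۷",
--         "8": "۸",
--         "9": "۹",
--     }
--
--     for e, p in numbers.items():
--         mystr = mystr.replace(e, p)
--     return mystr
-- ===== SOURCE B (Python) =====
-- def persian_num(mystr):
--     # Arithmetic code-point shift: Persian digits are a contiguous block at U+06F0,
--     # so each ASCII digit maps to chr(ord(c) + 0x06F0 - ord('0')); no table needed.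
--     out = []
--     for c in mystr:
--         if "0" <= c <= "9":
--             out.append(chr(ord(c) + 0x06F0 - 0x30))
--         else:
--             out.append(c)
--     return "".join(out)
-- ===== Notes on version B (the rewrite author's own statement) =====
-- stated objective: alternative
-- what changed: B drops the digit table entirely and does one pass over the input, mapping each ASCII digit by a constant code-point shift (ord(c)+0x06F0-0x30) instead of A's ten full-string replace scans over a dict.
import Mathlib
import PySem

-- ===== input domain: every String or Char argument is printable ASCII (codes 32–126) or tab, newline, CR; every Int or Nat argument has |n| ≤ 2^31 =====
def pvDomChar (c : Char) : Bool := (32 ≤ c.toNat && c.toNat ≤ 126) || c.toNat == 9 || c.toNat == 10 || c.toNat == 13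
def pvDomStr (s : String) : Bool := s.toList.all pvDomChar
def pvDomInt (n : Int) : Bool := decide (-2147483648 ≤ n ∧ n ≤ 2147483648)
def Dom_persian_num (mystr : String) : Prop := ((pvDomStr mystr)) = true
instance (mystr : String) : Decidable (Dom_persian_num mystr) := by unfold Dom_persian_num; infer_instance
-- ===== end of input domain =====

-- B does one pass over the input, mapping each ASCII digit by a constant code-point shift (no digit table), instead of A's ten full-string replace passes over a dict.


-- ===== PORT A =====
def persian_num (mystr : String) : String :=
  let numbers : PySem.Dict String String :=
    PySem.Dict.ofList [("0","۰"),("1","۱"),("2","۲"),("3","۳"),("4","۴"),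
                       ("5","۵"),("6","۶"),("7","۷"),("8","۸"),("9","۹")]
  (PySem.Dict.items numbers).foldl (fun s ep => PySem.Str.replace s ep.1 ep.2) mystr

-- ===== PORT B =====
-- B's loop: for each character append the shifted digit (code + 0x6F0 - 0x30) or the character itself
def pnLoop : List Char → List Char
  | [] => []
  | c :: t =>
      (if '0' ≤ c ∧ c ≤ '9' then Char.ofNat (c.toNat + 0x6F0 - 0x30) else c) :: pnLoop t

def persian_num_alt (mystr : String) : String :=
  String.ofList (pnLoop mystr.toList)

-- ===== PRECONDITION & SPEC =====
def Spec_persian_num (mystr : String) (out : String) : Prop := out = persian_num_alt mystr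
instance (mystr : String) (out : String) : Decidable (Spec_persian_num mystr out) := by unfold Spec_persian_num; infer_instance

-- ===== CLAIM (what is proved, stated in full; the proofs are below) =====
def Claim_equal_persian_num : Prop := ∀ (mystr : String), Dom_persian_num mystr → Spec_persian_num mystr (persian_num mystr)

-- ===== LEMMAS AND PROOFS =====

-- the per-character translation both programs implement
def pmap (c : Char) : Char :=
  if c = '0' then '۰' else if c = '1' then '۱' else if c = '2' then '۲' else
  if c = '3' then '۳' else if c = '4' then '۴' else if c = '5' then '۵' else
  if c = '6' then '۶' else if c = '7' then '۷' else if c = '8' then '۸' else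
  if c = '9' then '۹' else c

lemma go_single (e p : Char) (l : List Char) (fuel : Nat) (acc : List Char)
    (h : l.length ≤ fuel) :
    PySem.Chars.replace.go [e] [p] fuel l acc
      = acc.reverse ++ l.map (fun c => if c = e then p else c) := by
  induction l generalizing fuel acc with
  | nil => cases fuel <;> simp [PySem.Chars.replace.go]
  | cons c t ih =>
      cases fuel with
      | zero => simp at h
      | succ f =>
          simp only [PySem.Chars.replace.go]
          by_cases hc : c = e
          · subst hc
            simp [List.isPrefixOf, ih _ _ (by simpa using h)]
          · simp [List.isPrefixOf, beq_iff_eq, Ne.symm hc, hc, ih _ _ (by simpa using h)]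

-- a .replace whose pattern and replacement are single characters is a per-character map
lemma replace_single (s o n : String) (e p : Char) (ho : o.toList = [e]) (hn : n.toList = [p]) :
    (PySem.Str.replace s o n).toList = s.toList.map (fun c => if c = e then p else c) := by
  rw [PySem.Str.toList_replace, ho, hn, PySem.Chars.replace, if_neg (by simp)]
  exact (go_single e p s.toList s.toList.length [] le_rfl).trans (by simp)

-- A's ten sequential single-char replacements compose to pmap (Persian digits are not ASCII digits)
lemma comp10 (c : Char) :
    (fun c => if c = '9' then '۹' else c) ((fun c => if c = '8' then '۸' else c)
    ((fun c => if c = '7' then '۷' else c) ((fun c => if c = '6' then '۶' else c)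
    ((fun c => if c = '5' then '۵' else c) ((fun c => if c = '4' then '۴' else c)
    ((fun c => if c = '3' then '۳' else c) ((fun c => if c = '2' then '۲' else c)
    ((fun c => if c = '1' then '۱' else c) ((fun c => if c = '0' then '۰' else c) c)))))))))
      = pmap c := by
  by_cases h0 : c = '0'; · subst h0; decide
  by_cases h1 : c = '1'; · subst h1; decide
  by_cases h2 : c = '2'; · subst h2; decide
  by_cases h3 : c = '3'; · subst h3; decide
  by_cases h4 : c = '4'; · subst h4; decide
  by_cases h5 : c = '5'; · subst h5; decide
  by_cases h6 : c = '6'; · subst h6; decide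
  by_cases h7 : c = '7'; · subst h7; decide
  by_cases h8 : c = '8'; · subst h8; decide
  by_cases h9 : c = '9'; · subst h9; decide
  simp [pmap, h0, h1, h2, h3, h4, h5, h6, h7, h8, h9]

lemma map10 (l : List Char) :
    (((((((((l.map (fun c => if c = '0' then '۰' else c)).map
      (fun c => if c = '1' then '۱' else c)).map
      (fun c => if c = '2' then '۲' else c)).map
      (fun c => if c = '3' then '۳' else c)).map
      (fun c => if c = '4' then '۴' else c)).map
      (fun c => if c = '5' then '۵' else c)).map
      (fun c => if c = '6' then '۶' else c)).map
      (fun c => if c = '7' then '۷' else c)).map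
      (fun c => if c = '8' then '۸' else c)).map
      (fun c => if c = '9' then '۹' else c) = l.map pmap := by
  induction l with
  | nil => rfl
  | cons c t ih =>
      simp only [List.map_cons]
      rw [ih]
      exact congrArg (fun x => x :: t.map pmap) (comp10 c)

lemma A_toList (s : String) : (persian_num s).toList = s.toList.map pmap := by
  have hit : (PySem.Dict.ofList [(("0":String),("۰":String)),("1","۱"),("2","۲"),("3","۳"),("4","۴"),
                       ("5","۵"),("6","۶"),("7","۷"),("8","۸"),("9","۹")]).items
      = [("0","۰"),("1","۱"),("2","۲"),("3","۳"),("4","۴"),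
         ("5","۵"),("6","۶"),("7","۷"),("8","۸"),("9","۹")] := by decide
  simp only [persian_num, hit]
  simp only [List.foldl]
  rw [replace_single _ _ _ '9' '۹' (by decide) (by decide),
      replace_single _ _ _ '8' '۸' (by decide) (by decide),
      replace_single _ _ _ '7' '۷' (by decide) (by decide),
      replace_single _ _ _ '6' '۶' (by decide) (by decide),
      replace_single _ _ _ '5' '۵' (by decide) (by decide),
      replace_single _ _ _ '4' '۴' (by decide) (by decide),
      replace_single _ _ _ '3' '۳' (by decide) (by decide),
      replace_single _ _ _ '2' '۲' (by decide) (by decide),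
      replace_single _ _ _ '1' '۱' (by decide) (by decide),
      replace_single _ _ _ '0' '۰' (by decide) (by decide)]
  exact map10 s.toList

-- B's arithmetic shift agrees with pmap on every character
lemma shift_eq_pmap (c : Char) :
    (if '0' ≤ c ∧ c ≤ '9' then Char.ofNat (c.toNat + 0x6F0 - 0x30) else c) = pmap c := by
  by_cases h0 : c = '0'; · subst h0; decide
  by_cases h1 : c = '1'; · subst h1; decide
  by_cases h2 : c = '2'; · subst h2; decide
  by_cases h3 : c = '3'; · subst h3; decide
  by_cases h4 : c = '4'; · subst h4; decide
  by_cases h5 : c = '5'; · subst h5; decide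
  by_cases h6 : c = '6'; · subst h6; decide
  by_cases h7 : c = '7'; · subst h7; decide
  by_cases h8 : c = '8'; · subst h8; decide
  by_cases h9 : c = '9'; · subst h9; decide
  rw [if_neg, pmap]
  · simp [h0, h1, h2, h3, h4, h5, h6, h7, h8, h9]
  · rintro ⟨ha, hb⟩
    rw [Char.le_def] at ha hb
    have ha' : 48 ≤ c.toNat := UInt32.le_iff_toNat_le.mp ha
    have hb' : c.toNat ≤ 57 := UInt32.le_iff_toNat_le.mp hb
    have hd : c.toNat = 48 ∨ c.toNat = 49 ∨ c.toNat = 50 ∨ c.toNat = 51 ∨ c.toNat = 52 ∨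
        c.toNat = 53 ∨ c.toNat = 54 ∨ c.toNat = 55 ∨ c.toNat = 56 ∨ c.toNat = 57 := by omega
    have hofn := Char.ofNat_toNat c
    rcases hd with h|h|h|h|h|h|h|h|h|h <;> rw [h] at hofn
    · exact h0 (by rw [← hofn])
    · exact h1 (by rw [← hofn])
    · exact h2 (by rw [← hofn])
    · exact h3 (by rw [← hofn])
    · exact h4 (by rw [← hofn])
    · exact h5 (by rw [← hofn])
    · exact h6 (by rw [← hofn])
    · exact h7 (by rw [← hofn])
    · exact h8 (by rw [← hofn])
    · exact h9 (by rw [← hofn])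

lemma pnLoop_eq_map (l : List Char) : pnLoop l = l.map pmap := by
  induction l with
  | nil => rfl
  | cons c t ih =>
      simp only [pnLoop, List.map_cons, ih]
      exact congrArg (fun x => x :: t.map pmap) (shift_eq_pmap c)

lemma B_toList (s : String) : (persian_num_alt s).toList = s.toList.map pmap := by
  simp [persian_num_alt, pnLoop_eq_map]

-- ===== VERDICT (by name: the statement is the Claim_ definition above) =====
theorem persian_num_spec : Claim_equal_persian_num := by
  intro mystr _
  unfold Spec_persian_num
  apply String.toList_inj.mp
  rw [A_toList, B_toList]
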